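-- pv_equiv track=rewrite | github.com/rafaelperazzo/programacao-web | moodledata/vpl_data/59/usersdata/126/64162/submittedfiles/testes.py | lista
-- ===== SOURCE A (Python) =====
-- def lista(numero):
--     lista=[]
--     cont=0
--     while numero>0:
--         resto=numero%10
--         cont=cont+1
--         lista.insert(0,resto)
--         numero = numero//10
--     return (lista,cont)
-- ===== SOURCE B (Python) =====
-- def lista(numero):
--     if numero <= 0:
--         return ([], 0)
--     s = str(numero)
--     return ([int(c) for c in s], len(s))
-- ===== Notes on version B (the rewrite author's own statement) =====
-- stated objective: idiomatic
-- what changed: Replaces the modulus/quotient peel-and-prepend accumulator loop with the decimal string of the number: map int over the characters of str(numero), already in reading order, and take its length.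
import Mathlib
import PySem

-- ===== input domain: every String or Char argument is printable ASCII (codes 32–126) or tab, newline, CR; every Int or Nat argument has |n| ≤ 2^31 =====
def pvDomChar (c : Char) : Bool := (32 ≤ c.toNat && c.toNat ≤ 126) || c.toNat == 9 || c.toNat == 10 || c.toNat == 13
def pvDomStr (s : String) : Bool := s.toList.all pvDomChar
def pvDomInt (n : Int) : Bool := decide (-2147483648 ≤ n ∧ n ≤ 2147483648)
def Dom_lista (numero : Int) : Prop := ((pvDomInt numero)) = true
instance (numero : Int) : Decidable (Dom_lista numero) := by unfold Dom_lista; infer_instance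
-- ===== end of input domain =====

-- B replaces A's modulus/quotient peel-and-prepend loop by mapping int over the characters of str(numero) (idiomatic; same cost).

-- ===== PORT A =====
-- A's while loop: peel the last digit, prepend it, count, and floor-divide the number by ten
def listaLoop (numero : Int) (acc : List Int) (cont : Int) : List Int × Int :=
  if 0 < numero then
    listaLoop (PySem.Int.floordiv numero 10) (PySem.Int.mod numero 10 :: acc) (cont + 1)
  else (acc, cont)
termination_by numero.toNat
decreasing_by
  rw [PySem.Int.floordiv_eq_ediv_of_pos (by norm_num)]
  omega

def lista (numero : Int) : List Int × Int := listaLoop numero [] 0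

-- ===== PORT B =====
-- int(c) for a single character c; exact on the decimal-digit characters str(numero) produces
def pvDigitVal (c : Char) : Int := (c.toNat : Int) - 48

def lista_alt (numero : Int) : List Int × Int :=
  if numero ≤ 0 then ([], 0)
  else
    let cs := PySem.Int.toChars numero   -- str(numero)
    (cs.map pvDigitVal, (cs.length : Int))

-- ===== PRECONDITION & SPEC =====
def Spec_lista (numero : Int) (out : List Int × Int) : Prop := out = lista_alt numero
instance (numero : Int) (out : List Int × Int) : Decidable (Spec_lista numero out) := by unfold Spec_lista; infer_instance

-- ===== CLAIM (what is proved, stated in full; the proofs are below) =====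
def Claim_equal_lista : Prop := ∀ (numero : Int), Dom_lista numero → Spec_lista numero (lista numero)

-- ===== LEMMAS AND PROOFS =====

-- core's toDigitsCore, with enough fuel, lists the digits big-endian
lemma toDigitsCore_eq_digits (m : Nat) : ∀ (fuel : Nat) (acc : List Char), 0 < m → m < fuel →
    Nat.toDigitsCore 10 fuel m acc = ((Nat.digits 10 m).map Nat.digitChar).reverse ++ acc := by
  induction m using Nat.strong_induction_on with
  | _ m ih =>
    intro fuel acc hm hfuel
    match fuel with
    | 0 => omega
    | f + 1 =>
      rw [Nat.toDigitsCore]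
      rw [Nat.digits_def' (by norm_num : 1 < 10) hm]
      simp only [List.map_cons, List.reverse_cons, List.append_assoc, List.singleton_append]
      by_cases h0 : m / 10 = 0
      · rw [if_pos h0]
        simp [h0]
      · rw [if_neg h0]
        rw [ih (m / 10) (Nat.div_lt_self hm (by norm_num)) f (Nat.digitChar (m % 10) :: acc)
              (Nat.pos_of_ne_zero h0) (by omega)]

-- A's loop output in terms of Nat.digits
lemma listaLoop_eq_digits (m : Nat) : ∀ (acc : List Int) (cont : Int),
    listaLoop (m : Int) acc cont =
      (((Nat.digits 10 m).map (fun d => Int.ofNat d)).reverse ++ acc,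
       cont + (Nat.digits 10 m).length) := by
  induction m using Nat.strong_induction_on with
  | _ m ih =>
    intro acc cont
    rw [listaLoop]
    by_cases hm : 0 < m
    · rw [if_pos (by exact_mod_cast hm)]
      rw [PySem.Int.floordiv_eq_ediv_of_pos (by norm_num : (0:Int) < 10),
          PySem.Int.mod_eq_emod_of_pos (by norm_num : (0:Int) < 10)]
      have hdiv : ((m : Int)) / 10 = ((m / 10 : Nat) : Int) := by omega
      have hmod : ((m : Int)) % 10 = ((m % 10 : Nat) : Int) := by omega
      rw [hdiv, hmod]
      rw [ih (m / 10) (Nat.div_lt_self hm (by norm_num))]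
      rw [Nat.digits_def' (by norm_num : 1 < 10) hm]
      simp only [List.map_cons, List.reverse_cons, List.append_assoc, List.singleton_append,
        List.length_cons]
      rw [Prod.mk.injEq]
      refine ⟨rfl, by push_cast; ring⟩
    · have : m = 0 := by omega
      subst this
      simp

lemma digitVal_digitChar (d : Nat) (hd : d < 10) : pvDigitVal (Nat.digitChar d) = (d : Int) := by
  interval_cases d <;> rfl

theorem lista_spec_aux (numero : Int) : lista numero = lista_alt numero := by
  unfold lista lista_alt
  by_cases h : numero ≤ 0
  · rw [listaLoop, if_neg (by omega), if_pos h]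
  · rw [if_neg h]
    have hpos : 0 < numero := by omega
    have hcast : numero = ((numero.toNat : Nat) : Int) := by omega
    have hmpos : 0 < numero.toNat := by omega
    rw [hcast, listaLoop_eq_digits]
    have htc : PySem.Int.toChars ((numero.toNat : Nat) : Int)
        = ((Nat.digits 10 numero.toNat).map Nat.digitChar).reverse := by
      rw [PySem.Int.toChars, if_neg (by omega)]
      rw [Nat.toDigits]
      simp only [Int.toNat_natCast]
      exact toDigitsCore_eq_digits numero.toNat (numero.toNat + 1) [] hmpos (by omega)
        |>.trans (by simp)
    rw [htc]
    show (_, _) = (_, _)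
    rw [Prod.mk.injEq]
    constructor
    · rw [List.map_reverse, List.map_map, List.append_nil]
      congr 1
      apply List.map_congr_left
      intro d hd
      exact (digitVal_digitChar d (Nat.digits_lt_base (by norm_num) hd)).symm
    · simp

-- ===== VERDICT (by name: the statement is the Claim_ definition above) =====
theorem lista_spec : Claim_equal_lista := by
  intro numero _
  exact lista_spec_aux numero
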